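-- pv_equiv track=rewrite | github.com/tedueda/carat_community | backend/app/services/translation.py | get_user_preferred_language
-- ===== SOURCE A (Python) =====
-- from typing import Optional
--
-- SUPPORTED_LANGUAGES = ["ja", "en", "ko", "es", "pt", "fr", "it", "de"]
--
-- DEFAULT_LANGUAGE = "ja"
--
-- def get_user_preferred_language(
--     user_lang: Optional[str] = None,
--     accept_language: Optional[str] = None,
--     query_lang: Optional[str] = None
-- ) -> str:
--     """
--     Determine the user's preferred language.
--
--     Priority:
--     1. Query parameter (?lang=xx)
--     2. User profile setting (if logged in)
--     3. Accept-Language header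
--     4. Default to 'ja'
--
--     Args:
--         user_lang: Language from user profile
--         accept_language: Accept-Language header value
--         query_lang: Language from query parameter
--
--     Returns:
--         Language code
--     """
--     # Priority 1: Query parameter
--     if query_lang and query_lang in SUPPORTED_LANGUAGES:
--         return query_lang
--
--     # Priority 2: User profile setting
--     if user_lang and user_lang in SUPPORTED_LANGUAGES:
--         return user_lang
--
--     # Priority 3: Accept-Language header
--     if accept_language:
--         # Parse Accept-Language header (simplified)
--         # Format: "ja,en-US;q=0.9,en;q=0.8"
--         for lang_part in accept_language.split(","):
--             lang = lang_part.split(";")[0].strip().split("-")[0].lower()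
--             if lang in SUPPORTED_LANGUAGES:
--                 return lang
--
--     # Priority 4: Default
--     return DEFAULT_LANGUAGE
-- ===== SOURCE B (Python) =====
-- from typing import Optional
--
-- SUPPORTED_LANGUAGES = ["ja", "en", "ko", "es", "pt", "fr", "it", "de"]
--
-- DEFAULT_LANGUAGE = "ja"
--
--
-- def get_user_preferred_language(
--     user_lang: Optional[str] = None,
--     accept_language: Optional[str] = None,
--     query_lang: Optional[str] = None
-- ) -> str:
--     """Build the answer back-to-front: start from the default and let each
--     higher-priority supported candidate overwrite the accumulator.
--
--     The Accept-Language tokens are swept in REVERSE order so that the first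
--     supported token (forward order) is the last overwrite and therefore wins.
--     """
--     result = DEFAULT_LANGUAGE
--     if accept_language:
--         for part in reversed(accept_language.split(",")):
--             lang = part.split(";")[0].strip().split("-")[0].lower()
--             if lang in SUPPORTED_LANGUAGES:
--                 result = lang
--     if user_lang and user_lang in SUPPORTED_LANGUAGES:
--         result = user_lang
--     if query_lang and query_lang in SUPPORTED_LANGUAGES:
--         result = query_lang
--     return result
-- ===== Notes on version B (the rewrite author's own statement) =====
-- stated objective: alternative
-- what changed: Instead of A's priority-ordered early returns with an inner first-match parse loop, B computes the answer back-to-front: it starts from the default, sweeps the Accept-Language tokens in reverse overwriting an accumulator on each supported token, then overwrites with the profile and query languages, returning the accumulator.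
import Mathlib
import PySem

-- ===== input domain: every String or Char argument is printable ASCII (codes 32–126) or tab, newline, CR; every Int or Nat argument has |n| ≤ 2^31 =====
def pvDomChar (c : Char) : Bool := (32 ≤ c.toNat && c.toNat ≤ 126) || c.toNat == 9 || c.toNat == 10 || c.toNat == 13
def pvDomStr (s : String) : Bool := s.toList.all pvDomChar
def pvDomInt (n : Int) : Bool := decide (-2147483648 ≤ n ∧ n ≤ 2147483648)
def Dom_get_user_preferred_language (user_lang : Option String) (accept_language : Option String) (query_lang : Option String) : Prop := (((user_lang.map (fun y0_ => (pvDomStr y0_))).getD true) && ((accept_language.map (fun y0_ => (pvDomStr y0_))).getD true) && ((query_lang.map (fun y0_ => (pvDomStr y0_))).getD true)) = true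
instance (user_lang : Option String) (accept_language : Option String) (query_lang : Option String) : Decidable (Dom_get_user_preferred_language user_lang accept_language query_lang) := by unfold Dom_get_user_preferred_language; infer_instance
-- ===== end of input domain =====

-- B computes the answer back-to-front with an overwrite accumulator (default, then reversed header tokens, then user, then query) instead of A's priority early returns; objective: alternative decomposition, same cost.


-- module constants; pvSplit is s.split(sep) for a nonempty literal sep (split? is none only for sep = "")
def pvSUPPORTED : List String := ["ja", "en", "ko", "es", "pt", "fr", "it", "de"]
def pvDEFAULT : String := "ja"
def pvSplit (s sep : String) : List String := (PySem.Str.split? s sep).getD []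

-- ===== PORT A =====
-- the inner 'for lang_part in accept_language.split(","): …' loop of A
def pvALoop : List String → Option String
  | [] => none
  | lang_part :: rest =>
    let lang := PySem.Str.lower ((pvSplit (PySem.Str.strip ((pvSplit lang_part ";").headD "")) "-").headD "")
    if pvSUPPORTED.contains lang then some lang else pvALoop rest

-- priorities 3 and 4 of A
def pvAAccept (accept_language : Option String) : String :=
  match accept_language with
  | some s =>
    if !(s == "") then
      match pvALoop (pvSplit s ",") with
      | some lang => lang
      | none => pvDEFAULT
    else pvDEFAULT
  | none => pvDEFAULT

-- priority 2 of A
def pvAUser (user_lang accept_language : Option String) : String :=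
  match user_lang with
  | some s => if !(s == "") && pvSUPPORTED.contains s then s else pvAAccept accept_language
  | none => pvAAccept accept_language

def get_user_preferred_language (user_lang : Option String) (accept_language : Option String) (query_lang : Option String) : String :=
  match query_lang with
  | some s => if !(s == "") && pvSUPPORTED.contains s then s else pvAUser user_lang accept_language
  | none => pvAUser user_lang accept_language

-- ===== PORT B =====
-- lang = part.split(";")[0].strip().split("-")[0].lower()
def pvBTok (part : String) : String :=
  PySem.Str.lower ((pvSplit (PySem.Str.strip ((pvSplit part ";").headD "")) "-").headD "")

-- 'for part in reversed(accept_language.split(",")): … result = lang' (overwrite accumulator)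
def pvBStep (acc : String) (part : String) : String :=
  let lang := pvBTok part
  if pvSUPPORTED.contains lang then lang else acc

def get_user_preferred_language_alt (user_lang : Option String) (accept_language : Option String) (query_lang : Option String) : String :=
  let result := pvDEFAULT
  let result :=
    match accept_language with
    | some s => if !(s == "") then ((pvSplit s ",").reverse).foldl pvBStep result else result
    | none => result
  let result :=
    match user_lang with
    | some su => if !(su == "") && pvSUPPORTED.contains su then su else result
    | none => result
  match query_lang with
  | some sq => if !(sq == "") && pvSUPPORTED.contains sq then sq else result
  | none => result

-- ===== PRECONDITION & SPEC =====
def Spec_get_user_preferred_language (user_lang : Option String) (accept_language : Option String) (query_lang : Option String) (out : String) : Prop := out = get_user_preferred_language_alt user_lang accept_language query_lang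
instance (user_lang : Option String) (accept_language : Option String) (query_lang : Option String) (out : String) : Decidable (Spec_get_user_preferred_language user_lang accept_language query_lang out) := by unfold Spec_get_user_preferred_language; infer_instance

-- ===== CLAIM (what is proved, stated in full; the proofs are below) =====
def Claim_equal_get_user_preferred_language : Prop := ∀ (user_lang : Option String) (accept_language : Option String) (query_lang : Option String), Dom_get_user_preferred_language user_lang accept_language query_lang → Spec_get_user_preferred_language user_lang accept_language query_lang (get_user_preferred_language user_lang accept_language query_lang)

-- ===== LEMMAS AND PROOFS =====

-- a reverse sweep with overwrite ends at the FIRST forward match (A's inner loop), or at the start value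
lemma pvRev_eq_loop (ts : List String) (acc : String) :
    (ts.reverse).foldl pvBStep acc = (pvALoop ts).getD acc := by
  rw [List.foldl_reverse]
  induction ts with
  | nil => simp [pvALoop]
  | cons p rest ih =>
    rw [List.foldr_cons, ih]
    simp only [pvALoop, pvBStep, pvBTok]
    split <;> simp

-- priorities 3+4 of A agree with B's reverse sweep starting from the default
lemma pvAccept_eq (a : Option String) :
    pvAAccept a =
      (match a with
       | some s => if !(s == "") then ((pvSplit s ",").reverse).foldl pvBStep pvDEFAULT else pvDEFAULT
       | none => pvDEFAULT) := by
  cases a with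
  | none => rfl
  | some s =>
    simp only [pvAAccept]
    by_cases h : s = ""
    · simp [h]
    · have hb : (!(s == "")) = true := by simpa using h
      rw [if_pos hb, if_pos hb, pvRev_eq_loop]
      cases pvALoop (pvSplit s ",") <;> simp

theorem pvMain (u a q : Option String) :
    get_user_preferred_language u a q = get_user_preferred_language_alt u a q := by
  unfold get_user_preferred_language get_user_preferred_language_alt pvAUser
  rw [pvAccept_eq a]

-- ===== VERDICT (by name: the statement is the Claim_ definition above) =====
theorem get_user_preferred_language_spec : Claim_equal_get_user_preferred_language := by
  intro u a q _
  exact pvMain u a q
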